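-- pv_equiv track=rewrite | github.com/tretar-meng/selenium-web | report/collector.py | moduleScopeMetric
-- ===== SOURCE A (Python) =====
-- def moduleScopeMetric(module):
--
--     metric = {
--         "total": len(module["files"]),
--         "pass" : 0,
--         "failed": 0,
--     }
--
--     for exFile in module["files"]:
--         if exFile["failed"] > 0:
--             metric["failed"]+=1
--         else:
--             metric["pass"]+=1
--
--
--     return metric
-- ===== SOURCE B (Python) =====
-- def moduleScopeMetric(module):
--     def count(files):
--         # recursively compute (pass, failed) for the list of files
--         if not files:
--             return (0, 0)
--         p, q = count(files[1:])
--         if files[0]["failed"] > 0: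
--             return (p, q + 1)
--         return (p + 1, q)
--
--     p, q = count(module["files"])
--     return {"total": p + q, "pass": p, "failed": q}
-- ===== Notes on version B (the rewrite author's own statement) =====
-- stated objective: alternative
-- what changed: B replaces A's imperative loop mutating two counters in a dict by a recursive helper that computes the (pass, failed) pair by structural recursion on the file list (back-to-front), building the result dict once from that pair with total = pass + failed.
import Mathlib
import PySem

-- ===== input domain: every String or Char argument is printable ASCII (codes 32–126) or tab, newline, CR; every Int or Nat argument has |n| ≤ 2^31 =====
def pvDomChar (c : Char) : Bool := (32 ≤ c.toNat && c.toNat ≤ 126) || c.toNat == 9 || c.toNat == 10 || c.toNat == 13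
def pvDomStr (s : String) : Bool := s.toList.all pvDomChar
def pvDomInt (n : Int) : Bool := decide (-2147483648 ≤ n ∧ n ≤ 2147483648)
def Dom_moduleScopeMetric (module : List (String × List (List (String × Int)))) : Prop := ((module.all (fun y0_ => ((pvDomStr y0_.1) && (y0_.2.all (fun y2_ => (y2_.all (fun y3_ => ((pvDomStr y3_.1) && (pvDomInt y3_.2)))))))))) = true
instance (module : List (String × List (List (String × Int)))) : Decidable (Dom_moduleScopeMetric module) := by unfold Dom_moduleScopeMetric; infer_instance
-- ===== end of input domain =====

-- B computes the (pass, failed) pair by structural recursion on the file list (back-to-front)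
-- and builds the dict once from that pair, replacing A's loop mutating two counters (objective: alternative).


-- ===== PORT A =====
-- one loop step of A: exFile["failed"] (KeyError → none), then bump "failed" or "pass"
def mSMStepA (m : PySem.Dict String Int) (exFile : List (String × Int)) :
    Option (PySem.Dict String Int) :=
  match (PySem.Dict.mk exFile).get? "failed" with
  | none => none
  | some v =>
      if v > 0 then some (m.modify "failed" 0 (· + 1))
      else some (m.modify "pass" 0 (· + 1))

def moduleScopeMetric (module : List (String × List (List (String × Int)))) : List (String × Int) :=
  match (PySem.Dict.mk module).get? "files" with
  | none => []   -- KeyError in Python; excluded by Pre_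
  | some files =>
      let metric : PySem.Dict String Int :=
        PySem.Dict.mk [("total", (files.length : Int)), ("pass", 0), ("failed", 0)]
      match files.foldl (fun om f => om.bind (fun m => mSMStepA m f)) (some metric) with
      | none => []   -- KeyError in Python; excluded by Pre_
      | some m => m.items

-- ===== PORT B =====
-- B's recursive helper count: (pass, failed) by structural recursion; none = KeyError
def mSMCount : List (List (String × Int)) → Option (Int × Int)
  | [] => some (0, 0)
  | f :: fs =>
      (mSMCount fs).bind fun r =>
        match (PySem.Dict.mk f).get? "failed" with
        | none => none   -- KeyError in Python; excluded by Pre_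
        | some v => if v > 0 then some (r.1, r.2 + 1) else some (r.1 + 1, r.2)

def moduleScopeMetric_alt (module : List (String × List (List (String × Int)))) : List (String × Int) :=
  match (PySem.Dict.mk module).get? "files" with
  | none => []   -- KeyError in Python; excluded by Pre_
  | some files =>
      match mSMCount files with
      | none => []   -- KeyError in Python; excluded by Pre_
      | some (p, q) => [("total", p + q), ("pass", p), ("failed", q)]

-- ===== PRECONDITION & SPEC =====
-- Pre_ excludes exactly the inputs where Python A raises KeyError: no "files" key, or a file without a "failed" key.
def Pre_moduleScopeMetric (module : List (String × List (List (String × Int)))) : Prop :=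
  (((PySem.Dict.mk module).get? "files").elim false
    (fun files => files.all (fun f => ((PySem.Dict.mk f).get? "failed").isSome))) = true
instance (module : List (String × List (List (String × Int)))) : Decidable (Pre_moduleScopeMetric module) := by unfold Pre_moduleScopeMetric; infer_instance

def pvWitness_moduleScopeMetric : (List (String × List (List (String × Int)))) :=
  [("files", [[("failed", 2)], [("failed", 0)]])]

def Spec_moduleScopeMetric (module : List (String × List (List (String × Int)))) (out : List (String × Int)) : Prop := out = moduleScopeMetric_alt module
instance (module : List (String × List (List (String × Int)))) (out : List (String × Int)) : Decidable (Spec_moduleScopeMetric module out) := by unfold Spec_moduleScopeMetric; infer_instance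

-- ===== CLAIM (what is proved, stated in full; the proofs are below) =====
def Claim_equal_moduleScopeMetric : Prop := ∀ (module : List (String × List (List (String × Int)))), Dom_moduleScopeMetric module → Pre_moduleScopeMetric module → Spec_moduleScopeMetric module (moduleScopeMetric module)

-- ===== LEMMAS AND PROOFS =====

-- A's loop, started at ("total",t)/("pass",p)/("failed",q), adds the non-failing count to p
-- and the failing count to q, provided every file has a "failed" key.
theorem mSM_loop (files : List (List (String × Int)))
    (h : ∀ f ∈ files, ((PySem.Dict.mk f).get? "failed").isSome = true) (t p q : Int) :
    files.foldl (fun om f => om.bind (fun m => mSMStepA m f))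
      (some (PySem.Dict.mk [("total", t), ("pass", p), ("failed", q)]))
    = some (PySem.Dict.mk
        [("total", t),
         ("pass", p + (files.countP (fun f => !decide ((PySem.Dict.mk f).getD "failed" 0 > 0)) : Nat)),
         ("failed", q + (files.countP (fun f => decide ((PySem.Dict.mk f).getD "failed" 0 > 0)) : Nat))]) := by
  induction files generalizing p q with
  | nil => simp
  | cons f fs ih =>
      have hf := h f (List.mem_cons_self ..)
      obtain ⟨v, hv⟩ := Option.isSome_iff_exists.mp hf
      have hget : (PySem.Dict.mk f).getD "failed" 0 = v := by
        rw [PySem.Dict.getD_eq_get?_getD, hv]; rfl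
      have hrest : ∀ g ∈ fs, ((PySem.Dict.mk g).get? "failed").isSome = true :=
        fun g hg => h g (List.mem_cons_of_mem _ hg)
      by_cases hvpos : v > 0
      · have hstep : mSMStepA (PySem.Dict.mk [("total", t), ("pass", p), ("failed", q)]) f
            = some (PySem.Dict.mk [("total", t), ("pass", p), ("failed", q + 1)]) := by
          simp only [mSMStepA, hv]; rw [if_pos hvpos]; rfl
        simp [List.foldl_cons, hstep, ih hrest, hget, hvpos, PySem.Dict.ext_iff]
        omega
      · have hstep : mSMStepA (PySem.Dict.mk [("total", t), ("pass", p), ("failed", q)]) f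
            = some (PySem.Dict.mk [("total", t), ("pass", p + 1), ("failed", q)]) := by
          simp only [mSMStepA, hv]; rw [if_neg hvpos]; rfl
        simp [List.foldl_cons, hstep, ih hrest, hget, hvpos, PySem.Dict.ext_iff]
        omega

-- B's recursion computes exactly the two counts, provided every file has a "failed" key.
theorem mSMCount_eq (files : List (List (String × Int)))
    (h : ∀ f ∈ files, ((PySem.Dict.mk f).get? "failed").isSome = true) :
    mSMCount files
    = some (((files.countP (fun f => !decide ((PySem.Dict.mk f).getD "failed" 0 > 0)) : Nat) : Int),
            ((files.countP (fun f => decide ((PySem.Dict.mk f).getD "failed" 0 > 0)) : Nat) : Int)) := by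
  induction files with
  | nil => simp [mSMCount]
  | cons f fs ih =>
      have hf := h f (List.mem_cons_self ..)
      obtain ⟨v, hv⟩ := Option.isSome_iff_exists.mp hf
      have hget : (PySem.Dict.mk f).getD "failed" 0 = v := by
        rw [PySem.Dict.getD_eq_get?_getD, hv]; rfl
      have hrest : ∀ g ∈ fs, ((PySem.Dict.mk g).get? "failed").isSome = true :=
        fun g hg => h g (List.mem_cons_of_mem _ hg)
      by_cases hvpos : v > 0
      · simp [mSMCount, ih hrest, hv, hget, hvpos]
      · simp [mSMCount, ih hrest, hv, hget, hvpos]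

-- ===== VERDICT (by name: the statement is the Claim_ definition above) =====
theorem moduleScopeMetric_spec : Claim_equal_moduleScopeMetric := by
  intro module _ hpre
  unfold Spec_moduleScopeMetric moduleScopeMetric moduleScopeMetric_alt
  unfold Pre_moduleScopeMetric at hpre
  cases hfiles : (PySem.Dict.mk module).get? "files" with
  | none => rw [hfiles] at hpre
  | some files =>
      rw [hfiles] at hpre
      simp only [Option.elim, List.all_eq_true] at hpre
      simp only [mSM_loop files hpre, mSMCount_eq files hpre, zero_add]
      have hcount : files.countP (fun f => decide ((PySem.Dict.mk f).getD "failed" 0 > 0))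
          + files.countP (fun f => !decide ((PySem.Dict.mk f).getD "failed" 0 > 0))
          = files.length := by
        have h := (List.length_eq_countP_add_countP
          (p := fun f => decide ((PySem.Dict.mk f).getD "failed" 0 > 0)) (l := files)).symm
        simp only [decide_not, Bool.decide_eq_true] at h
        exact h
      simp only [List.cons.injEq, Prod.mk.injEq, true_and, and_true]
      omega
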